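-- pv_equiv track=rewrite | github.com/tophercarstensen-hub/dnd-combat-forge | add_prof_and_audit.py | best_fitting_ability
-- ===== SOURCE A (Python) =====
-- def ability_mod(score: int) -> int:
--     return (score - 10) // 2
--
-- ABILITIES = ["str", "dex", "con", "int", "wis", "cha"]
--
-- def best_fitting_ability(atk_bonus: int, prof: int, abils: dict):
--     """Return (best_ability, magic_bonus, exact_match).
--
--     Searches for an ability whose modifier + prof (+ 0..3 magic) == atk_bonus.
--     Prefers max(str,dex), then any match, smallest magic bonus wins.
--     """
--     if atk_bonus is None:
--         return None, None, False
--     target = atk_bonus - prof  # ability_mod + magic_bonus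
--     mods = {a: ability_mod(abils.get(a, 10)) for a in ABILITIES}
--
--     # Candidate scoring: (magic_bonus, -priority)
--     candidates = []
--     priority = {"str": 3, "dex": 3, "wis": 2, "cha": 2, "int": 1, "con": 0}
--     for abil, mod in mods.items():
--         for magic in (0, 1, 2, 3):
--             if mod + magic == target:
--                 candidates.append((magic, -priority[abil], abil, mod, magic))
--                 break
--     if not candidates:
--         return None, None, False
--     candidates.sort()
--     _, _, abil, mod, magic = candidates[0]
--     return abil, magic, True
-- ===== SOURCE B (Python) =====
-- def ability_mod(score: int) -> int:
--     return (score - 10) // 2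
--
-- ABILITIES = ["str", "dex", "con", "int", "wis", "cha"]
--
-- PRIORITY = {"str": 3, "dex": 3, "wis": 2, "cha": 2, "int": 1, "con": 0}
--
-- def best_fitting_ability(atk_bonus: int, prof: int, abils: dict):
--     """Single pass: keep the lexicographically smallest (magic, -priority, ability)
--     key seen so far instead of building and sorting a candidate list."""
--     if atk_bonus is None:
--         return None, None, False
--     target = atk_bonus - prof
--     best = None
--     for a in ABILITIES:
--         needed = target - ability_mod(abils.get(a, 10))
--         if 0 <= needed <= 3:
--             key = (needed, -PRIORITY[a], a)
--             if best is None or key < best: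
--                 best = key
--     if best is None:
--         return None, None, False
--     return best[2], best[0], True
-- ===== Notes on version B (the rewrite author's own statement) =====
-- stated objective: simpler
-- what changed: Replaces the build-candidate-list + unrolled 0..3 magic loop + sort + take-first pipeline with a single pass over ABILITIES that computes the needed magic directly (target - mod) and keeps the lexicographically smallest (magic, -priority, ability) key in one variable.
import Mathlib
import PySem

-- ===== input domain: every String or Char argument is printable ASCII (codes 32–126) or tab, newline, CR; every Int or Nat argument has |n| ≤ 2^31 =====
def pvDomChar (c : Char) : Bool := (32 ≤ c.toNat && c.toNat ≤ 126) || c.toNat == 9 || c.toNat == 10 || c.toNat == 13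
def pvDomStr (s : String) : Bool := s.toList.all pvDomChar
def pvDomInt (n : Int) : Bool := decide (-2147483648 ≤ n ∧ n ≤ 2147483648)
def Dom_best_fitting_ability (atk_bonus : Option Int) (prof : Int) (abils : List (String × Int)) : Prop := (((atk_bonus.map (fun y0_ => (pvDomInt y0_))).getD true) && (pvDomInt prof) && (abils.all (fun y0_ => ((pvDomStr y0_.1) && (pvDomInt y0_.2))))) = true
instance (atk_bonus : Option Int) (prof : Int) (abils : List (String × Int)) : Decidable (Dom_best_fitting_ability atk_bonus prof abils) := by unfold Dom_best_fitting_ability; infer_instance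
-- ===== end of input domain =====

-- B replaces A's candidate-list + sort + take-first pipeline with a single pass keeping the
-- best (magic, -priority, ability) key; objective: simpler.

-- ===== PORT A =====
def ability_mod (score : Int) : Int := PySem.Int.floordiv (score - 10) 2

def ABILITIES : List String := ["str", "dex", "con", "int", "wis", "cha"]

def pvPriority : PySem.Dict String Int :=
  PySem.Dict.mk [("str", 3), ("dex", 3), ("wis", 2), ("cha", 2), ("int", 1), ("con", 0)]

-- candidate tuple (magic_bonus, -priority, abil, mod, magic)
abbrev Cand := Int × Int × String × Int × Int

-- Python's tuple '<' on candidate 5-tuples, lexicographic (hand port, exact: Int and str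
-- components compare exactly as in Python).
def candLt (x y : Cand) : Bool :=
  decide (x.1 < y.1) || (x.1 == y.1 &&
    (decide (x.2.1 < y.2.1) || (x.2.1 == y.2.1 &&
      (decide (x.2.2.1 < y.2.2.1) || (x.2.2.1 == y.2.2.1 &&
        (decide (x.2.2.2.1 < y.2.2.2.1) || (x.2.2.2.1 == y.2.2.2.1 &&
          decide (x.2.2.2.2 < y.2.2.2.2))))))))

-- inner 'for magic in (0,1,2,3): … break' loop, unrolled (the loop body appends at most once,
-- then breaks); priority[abil] always hits for abil ∈ ABILITIES, ported as getD with an unused default.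
def innerCands (target : Int) (abil : String) (mod : Int) : List Cand :=
  if mod + 0 = target then [(0, -(pvPriority.getD abil 0), abil, mod, 0)]
  else if mod + 1 = target then [(1, -(pvPriority.getD abil 0), abil, mod, 1)]
  else if mod + 2 = target then [(2, -(pvPriority.getD abil 0), abil, mod, 2)]
  else if mod + 3 = target then [(3, -(pvPriority.getD abil 0), abil, mod, 3)]
  else []

def best_fitting_ability (atk_bonus : Option Int) (prof : Int) (abils : List (String × Int)) : Option String × Option Int × Bool :=
  match atk_bonus with
  | none => (none, none, false)
  | some ab =>
    let target := ab - prof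
    -- dict comprehension over the six distinct ABILITIES keys: items in insertion order
    let mods : List (String × Int) := ABILITIES.map (fun a => (a, ability_mod ((PySem.Dict.mk abils).getD a 10)))
    let candidates := mods.foldl (fun acc p => acc ++ innerCands target p.1 p.2) []
    if candidates = [] then (none, none, false)
    else
      -- candidates.sort(): hand port as a stable insertion sort by Python tuple '<'
      -- (exact: a stable sort result is determined by the comparison)
      match candidates.foldl (fun acc x => PySem.List.insertBy candLt x acc) [] with
      | [] => (none, none, false)
      | (_, _, abil, _, magic) :: _ => (some abil, some magic, true)

-- ===== PORT B =====
-- best key (needed_magic, -priority, abil); Python tuple '<' on the triple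
abbrev BKey := Int × Int × String

def keyLt (x y : BKey) : Bool :=
  decide (x.1 < y.1) || (x.1 == y.1 &&
    (decide (x.2.1 < y.2.1) || (x.2.1 == y.2.1 && decide (x.2.2 < y.2.2))))

def best_fitting_ability_alt (atk_bonus : Option Int) (prof : Int) (abils : List (String × Int)) : Option String × Option Int × Bool :=
  match atk_bonus with
  | none => (none, none, false)
  | some ab =>
    let target := ab - prof
    let best := ABILITIES.foldl (fun best a =>
      let needed := target - ability_mod ((PySem.Dict.mk abils).getD a 10)
      if 0 ≤ needed ∧ needed ≤ 3 then
        let key : BKey := (needed, -(pvPriority.getD a 0), a)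
        match best with
        | none => some key
        | some b => if keyLt key b then some key else some b
      else best) none
    match best with
    | none => (none, none, false)
    | some b => (some b.2.2, some b.1, true)

-- ===== PRECONDITION & SPEC =====
def Spec_best_fitting_ability (atk_bonus : Option Int) (prof : Int) (abils : List (String × Int)) (out : Option String × Option Int × Bool) : Prop := out = best_fitting_ability_alt atk_bonus prof abils
instance (atk_bonus : Option Int) (prof : Int) (abils : List (String × Int)) (out : Option String × Option Int × Bool) : Decidable (Spec_best_fitting_ability atk_bonus prof abils out) := by unfold Spec_best_fitting_ability; infer_instance

-- ===== CLAIM (what is proved, stated in full; the proofs are below) =====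
def Claim_equal_best_fitting_ability : Prop := ∀ (atk_bonus : Option Int) (prof : Int) (abils : List (String × Int)), Dom_best_fitting_ability atk_bonus prof abils → Spec_best_fitting_ability atk_bonus prof abils (best_fitting_ability atk_bonus prof abils)

-- ===== LEMMAS AND PROOFS =====

-- A's min-combining step on candidates / B's on keys
def candMin (b : Option Cand) (x : Cand) : Option Cand :=
  match b with
  | none => some x
  | some y => if candLt x y then some x else some y

def keyMin (b : Option BKey) (k : BKey) : Option BKey :=
  match b with
  | none => some k
  | some y => if keyLt k y then some k else some y

def toCand (t : Int) (k : BKey) : Cand := (k.1, k.2.1, k.2.2, t - k.1, k.1)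

theorem head?_insertBy (x : Cand) (s : List Cand) :
    (PySem.List.insertBy candLt x s).head? =
      some (match s.head? with | none => x | some h => if candLt x h then x else h) := by
  cases s <;> simp [PySem.List.insertBy]; split <;> simp

-- head of the insertion sort = left fold of the min step
theorem isort_head (l : List Cand) :
    (l.foldl (fun acc x => PySem.List.insertBy candLt x acc) []).head? = l.foldl candMin none := by
  induction l using List.reverseRecOn with
  | nil => rfl
  | append_singleton l x ih =>
      simp only [List.foldl_append, List.foldl_cons, List.foldl_nil, head?_insertBy, ih]
      cases h : l.foldl candMin none with
      | none => simp [candMin]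
      | some y => simp only [candMin]; split <;> simp

theorem foldl_candMin_eq_none (l : List Cand) (b : Option Cand) :
    l.foldl candMin b = none ↔ l = [] ∧ b = none := by
  induction l generalizing b with
  | nil => simp
  | cons x t ih =>
      simp only [List.foldl_cons, ih]
      constructor
      · rintro ⟨h, hb⟩
        cases b <;> simp [candMin] at hb; split at hb <;> simp_all
      · rintro ⟨h, _⟩; exact absurd h (by simp)

theorem candLt_toCand (t : Int) (k k' : BKey) : candLt (toCand t k) (toCand t k') = keyLt k k' := by
  obtain ⟨a, b, c⟩ := k; obtain ⟨a', b', c'⟩ := k'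
  simp only [candLt, keyLt, toCand]
  rcases lt_trichotomy a a' with h | h | h
  · simp [h]
  · subst h
    rcases lt_trichotomy b b' with h | h | h
    · simp [h]
    · subst h
      rcases lt_trichotomy c c' with h | h | h
      · simp [h]
      · subst h; simp
      · have hne : (c == c') = false := by simpa using h.ne'
        simp [hne, not_lt_of_gt h]
    · have hne : (b == b') = false := by simpa using h.ne'
      simp [hne, not_lt_of_gt h]
  · have hne : (a == a') = false := by simpa using h.ne'
    simp [hne, not_lt_of_gt h]

-- normal form of the unrolled inner loop
theorem innerCands_eq (t : Int) (a : String) (m : Int) :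
    innerCands t a m =
      if 0 ≤ t - m ∧ t - m ≤ 3 then [(t - m, -(pvPriority.getD a 0), a, m, t - m)] else [] := by
  unfold innerCands
  by_cases h0 : m + 0 = t
  · rw [if_pos h0, if_pos (by omega)]
    simp only [show t - m = 0 by omega]
  · rw [if_neg h0]
    by_cases h1 : m + 1 = t
    · rw [if_pos h1, if_pos (by omega)]
      simp only [show t - m = 1 by omega]
    · rw [if_neg h1]
      by_cases h2 : m + 2 = t
      · rw [if_pos h2, if_pos (by omega)]
        simp only [show t - m = 2 by omega]
      · rw [if_neg h2]
        by_cases h3 : m + 3 = t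
        · rw [if_pos h3, if_pos (by omega)]
          simp only [show t - m = 3 by omega]
        · rw [if_neg h3, if_neg (by omega)]

-- one ability step: folding A's candidate(s) into the running min = B's step on keys
theorem step_bridge (t : Int) (a : String) (m : Int) (b : Option BKey) :
    (innerCands t a m).foldl candMin (b.map (toCand t)) =
      ((if 0 ≤ t - m ∧ t - m ≤ 3 then
          keyMin b (t - m, -(pvPriority.getD a 0), a)
        else b)).map (toCand t) := by
  rw [innerCands_eq]
  split_ifs with h
  · have hm : m = t - (t - m) := by omega
    cases b with
    | none => simp [candMin, keyMin, toCand]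
    | some k =>
        simp only [List.foldl_cons, List.foldl_nil, Option.map_some, candMin, keyMin]
        have hm2 : t - (t - m) = m := by omega
        have : ((t - m, -(pvPriority.getD a 0), a, m, t - m) : Cand) =
            toCand t (t - m, -(pvPriority.getD a 0), a) := by simp [toCand, hm2]
        rw [this, candLt_toCand]
        split <;> simp
  · simp

-- whole loop: A's candidate fold-min over any ability list = B's fold, through toCand
theorem loop_bridge (t : Int) (modOf : String → Int) :
    ∀ (as_ : List String) (acc : List Cand) (b : Option BKey),
      acc.foldl candMin none = b.map (toCand t) →
      (as_.foldl (fun l a => l ++ innerCands t a (modOf a)) acc).foldl candMin none =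
        (as_.foldl (fun b a =>
          if 0 ≤ t - modOf a ∧ t - modOf a ≤ 3 then
            keyMin b (t - modOf a, -(pvPriority.getD a 0), a)
          else b) b).map (toCand t) := by
  intro as_
  induction as_ with
  | nil => intro acc b h; simpa using h
  | cons a rest ih =>
      intro acc b h
      simp only [List.foldl_cons]
      apply ih
      rw [List.foldl_append, h, step_bridge]

-- B's port with its lets zeta-reduced and the running-min match folded into keyMin (definitional)
theorem alt_char (ab prof : Int) (abils : List (String × Int)) :
    best_fitting_ability_alt (some ab) prof abils =
      match ABILITIES.foldl (fun b a =>
          if 0 ≤ (ab - prof) - ability_mod ((PySem.Dict.mk abils).getD a 10) ∧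
              (ab - prof) - ability_mod ((PySem.Dict.mk abils).getD a 10) ≤ 3 then
            keyMin b ((ab - prof) - ability_mod ((PySem.Dict.mk abils).getD a 10), -(pvPriority.getD a 0), a)
          else b) none with
      | none => (none, none, false)
      | some b => (some b.2.2, some b.1, true) := rfl

-- ===== VERDICT (by name: the statement is the Claim_ definition above) =====
theorem best_fitting_ability_spec : Claim_equal_best_fitting_ability := by
  intro atk_bonus prof abils _
  unfold Spec_best_fitting_ability
  cases atk_bonus with
  | none => rfl
  | some ab =>
    rw [alt_char ab prof abils]
    unfold best_fitting_ability
    simp only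
    set t := ab - prof with ht
    set modOf : String → Int := fun a => ability_mod ((PySem.Dict.mk abils).getD a 10) with hmod
    have hmap : (ABILITIES.map (fun a => (a, modOf a))).foldl
        (fun acc p => acc ++ innerCands t p.1 p.2) ([] : List Cand)
        = ABILITIES.foldl (fun l a => l ++ innerCands t a (modOf a)) [] := by
      rw [List.foldl_map]
    have hb := loop_bridge t modOf ABILITIES [] none (by simp)
    set C := ABILITIES.foldl (fun l a => l ++ innerCands t a (modOf a)) ([] : List Cand) with hC
    set B := ABILITIES.foldl (fun b a =>
        if 0 ≤ t - modOf a ∧ t - modOf a ≤ 3 then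
          keyMin b (t - modOf a, -(pvPriority.getD a 0), a)
        else b) (none : Option BKey) with hB
    rw [hmap]
    have hhead : (C.foldl (fun acc x => PySem.List.insertBy candLt x acc) []).head? = B.map (toCand t) := by
      rw [isort_head]; exact hb
    cases hBv : B with
    | none =>
      have hCnil : C = [] := by
        have h2 := hb
        rw [hBv] at h2
        simp only [Option.map_none] at h2
        exact ((foldl_candMin_eq_none C none).mp h2).1
      rw [if_pos hCnil]
    | some k =>
      have hCne : C ≠ [] := by
        intro hnil
        have h2 := hb
        rw [hBv, hnil] at h2
        simp at h2
      rw [if_neg hCne]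
      rw [hBv] at hhead
      simp only [Option.map_some] at hhead
      cases hs : C.foldl (fun acc x => PySem.List.insertBy candLt x acc) [] with
      | nil => rw [hs] at hhead; simp at hhead
      | cons c rest =>
        rw [hs] at hhead
        simp only [List.head?_cons, Option.some.injEq] at hhead
        subst hhead
        rfl
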